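-- pv_equiv track=rewrite | github.com/indiiira/www | main2.py | group_series
-- ===== SOURCE A (Python) =====
-- def group_series(signs):
--     grouped = []
--     current_series = signs[0]
--     count = 1
--     for i in range(1, len(signs)):
--         if signs[i] == current_series:
--             count += 1
--         else:
--             if current_series != '=':
--                 grouped.append((current_series, count))
--             current_series = signs[i]
--             count = 1
--     if current_series != '=':
--         grouped.append((current_series, count))
--     return grouped
-- ===== SOURCE B (Python) =====
-- def group_series(signs):
--     # Staged passes: boundary indices first, then segment emission by index arithmetic.
--     n = len(signs)
--     edges = [0] + [i for i in range(1, n) if signs[i] != signs[i - 1]] + [n]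
--     return [(signs[a], b - a) for a, b in zip(edges, edges[1:]) if signs[a] != '=']
-- ===== Notes on version B (the rewrite author's own statement) =====
-- stated objective: alternative
-- what changed: Replaced A's single-pass carry-state accumulator (current sign + running count, flushed on change and at the end) by two staged passes: first compute the list of boundary indices where adjacent signs differ, then emit (sign, length) for each adjacent edge pair via index arithmetic, skipping '=' segments.
import Mathlib
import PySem

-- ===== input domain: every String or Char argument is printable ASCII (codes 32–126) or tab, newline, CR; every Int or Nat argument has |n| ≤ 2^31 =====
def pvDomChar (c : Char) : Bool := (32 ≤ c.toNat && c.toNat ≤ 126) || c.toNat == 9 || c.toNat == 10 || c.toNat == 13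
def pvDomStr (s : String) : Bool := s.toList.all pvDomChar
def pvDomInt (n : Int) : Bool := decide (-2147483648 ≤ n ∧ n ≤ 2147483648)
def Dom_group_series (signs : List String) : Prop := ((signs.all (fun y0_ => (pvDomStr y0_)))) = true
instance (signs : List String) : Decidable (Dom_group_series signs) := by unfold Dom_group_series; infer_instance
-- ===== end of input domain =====

-- B replaces A's carry-state accumulator by two staged passes (boundary indices, then
-- segment emission by index arithmetic); equivalent on nonempty input (both raise IndexError on []).

-- ===== PORT A =====
-- the for-loop of A: state (grouped, current_series, count), one step per remaining element
def groupLoop (rest : List String) (grouped : List (String × Int)) (cur : String) (count : Int) :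
    List (String × Int) × String × Int :=
  match rest with
  | [] => (grouped, cur, count)
  | s :: t =>
    if s = cur then groupLoop t grouped cur (count + 1)
    else groupLoop t (if cur = "=" then grouped else grouped ++ [(cur, count)]) s 1

def group_series (signs : List String) : List (String × Int) :=
  match signs with
  | [] => []   -- Python raises IndexError here (signs[0]); excluded by Pre_group_series
  | s0 :: rest =>
    let (grouped, cur, count) := groupLoop rest [] s0 1
    if cur = "=" then grouped else grouped ++ [(cur, count)]

-- ===== PORT B =====
-- the boundary-index comprehension: [i for i in range(1, n) if signs[i] != signs[i-1]]
def bBoundaries (signs : List String) : List Nat :=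
  (List.range' 1 (signs.length - 1)).filter (fun i => signs.getD i "" ≠ signs.getD (i - 1) "")

-- edges = [0] + boundaries + [n]
def bEdges (signs : List String) : List Nat :=
  0 :: (bBoundaries signs ++ [signs.length])

-- the emission comprehension over zip(edges, edges[1:])
def group_series_alt (signs : List String) : List (String × Int) :=
  ((bEdges signs).zip (bEdges signs).tail).filterMap
    (fun ab => if signs.getD ab.1 "" ≠ "=" then some (signs.getD ab.1 "", (ab.2 : Int) - (ab.1 : Int)) else none)

-- ===== PRECONDITION & SPEC =====
-- Pre_ excludes only the empty list, on which A raises IndexError (signs[0]); B raises there too.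
def Pre_group_series (signs : List String) : Prop := signs ≠ []
instance (signs : List String) : Decidable (Pre_group_series signs) := by
  unfold Pre_group_series; infer_instance
def pvWitness_group_series : List String := ["+", "+", "=", "-"]

def Spec_group_series (signs : List String) (out : List (String × Int)) : Prop :=
  out = group_series_alt signs
instance (signs : List String) (out : List (String × Int)) : Decidable (Spec_group_series signs out) := by
  unfold Spec_group_series; infer_instance

-- ===== CLAIM =====
def Claim_equal_group_series : Prop := ∀ (signs : List String), Dom_group_series signs →
  Pre_group_series signs → Spec_group_series signs (group_series signs)

-- ===== LEMMAS AND PROOFS =====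
-- proof-side normal form: recursive run-splitting over the list structure
def countRun (v : String) : List String → Nat
  | [] => 0
  | s :: t => if s = v then 1 + countRun v t else 0

def listAlt (l : List String) : List (String × Int) :=
  match l with
  | [] => []
  | head :: t =>
    let c := countRun head t
    let tail := listAlt (t.drop c)
    if head = "=" then tail else (head, (1 + c : Int)) :: tail
termination_by l.length
decreasing_by simp only [List.length_cons, List.length_drop]; omega

-- ---- A-side: A's loop equals the normal form ----
def finishA (st : List (String × Int) × String × Int) : List (String × Int) :=
  if st.2.1 = "=" then st.1 else st.1 ++ [(st.2.1, st.2.2)]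

lemma groupLoop_eq_listAlt (t : List String) : ∀ (g : List (String × Int)) (cur : String) (count : Int),
    finishA (groupLoop t g cur count) =
      g ++ (if cur = "=" then [] else [(cur, count + (countRun cur t : Int))]) ++
        listAlt (t.drop (countRun cur t)) := by
  induction t with
  | nil =>
    intro g cur count
    simp [groupLoop, finishA, countRun, listAlt]
    split <;> simp
  | cons s t ih =>
    intro g cur count
    by_cases h : s = cur
    · subst h
      have hstep : groupLoop (s :: t) g s count = groupLoop t g s (count + 1) := by
        simp [groupLoop]
      have hcr : countRun s (s :: t) = countRun s t + 1 := by
        simp [countRun, Nat.add_comm]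
      rw [hstep, ih, hcr, List.drop_succ_cons]
      have h2 : count + 1 + (countRun s t : Int) = count + ((countRun s t + 1 : Nat) : Int) := by
        push_cast; ring
      rw [h2, List.append_assoc]
    · simp only [groupLoop, countRun, if_neg h, ih, List.drop_zero]
      rw [listAlt]
      by_cases hc : cur = "="
      · simp [hc]
        split <;> simp
      · simp [hc]
        split <;> simp

-- ---- B-side: run decomposition facts ----
lemma replicate_decomp (v : String) (rest : List String) :
    rest = List.replicate (countRun v rest) v ++ rest.drop (countRun v rest) := by
  induction rest with
  | nil => rfl
  | cons s t ih =>
    by_cases h : s = v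
    · subst h
      simp only [countRun, Nat.add_comm 1]
      exact congrArg _ ih
    · simp [countRun, h]

lemma drop_head_ne (v : String) (rest : List String)
    (h : rest.drop (countRun v rest) ≠ []) :
    (rest.drop (countRun v rest)).getD 0 "" ≠ v := by
  induction rest with
  | nil => simp at h
  | cons s t ih =>
    by_cases hs : s = v
    · subst hs
      simp only [countRun, Nat.add_comm 1] at h ⊢
      exact ih h
    · simp only [countRun, if_neg hs, List.drop_zero]
      cases t <;> simpa using hs

lemma getD_pre (r : Nat) (s0 : String) (t : List String) (i : Nat) (h : i < r) :
    (List.replicate r s0 ++ t).getD i "" = s0 := by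
  rw [List.getD_append _ _ _ _ (by simpa using h)]
  simp [List.getD_eq_getElem?_getD, h]

lemma getD_suf (r : Nat) (s0 : String) (t : List String) (j : Nat) :
    (List.replicate r s0 ++ t).getD (j + r) "" = t.getD j "" := by
  rw [List.getD_append_right _ _ _ _ (by simp)]
  simp

lemma filter_range'_shift (p q : Nat → Bool) (b r : Nat) :
    ∀ a, (∀ j, a ≤ j → p (j + r) = q j) →
    (List.range' (a + r) b).filter p = ((List.range' a b).filter q).map (· + r) := by
  induction b with
  | zero => intro a _; simp
  | succ b ih =>
    intro a h
    rw [List.range'_succ, List.range'_succ, List.filter_cons, List.filter_cons, h a le_rfl]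
    have := ih (a + 1) (fun j hj => h j (by omega))
    by_cases hq : q a = true
    · simp only [hq, if_pos trivial, List.map_cons]
      rw [show a + r + 1 = (a + 1) + r by omega, this]
    · simp only [hq]
      rw [show a + r + 1 = (a + 1) + r by omega, this]
      simp

lemma boundaries_shift (r : Nat) (s0 : String) (t : List String) (hr : 1 ≤ r)
    (ht : t ≠ []) (hh : t.getD 0 "" ≠ s0) :
    bBoundaries (List.replicate r s0 ++ t) = r :: (bBoundaries t).map (· + r) := by
  unfold bBoundaries
  have hlen : (List.replicate r s0 ++ t).length = r + t.length := by simp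
  have hsplit : (List.replicate r s0 ++ t).length - 1 = (r - 1) + t.length := by omega
  rw [hlen] at hsplit ⊢
  rw [hsplit, ← List.range'_append]
  rw [List.filter_append]
  have h1 : (List.range' 1 (r - 1)).filter
      (fun i => (List.replicate r s0 ++ t).getD i "" ≠ (List.replicate r s0 ++ t).getD (i - 1) "") = [] := by
    rw [List.filter_eq_nil_iff]
    intro i hi
    rw [List.mem_range'] at hi
    obtain ⟨j, hj, hij⟩ := hi
    have hiub : i < r := by omega
    have h1' : 1 ≤ i := by omega
    rw [getD_pre r s0 t i hiub, getD_pre r s0 t (i - 1) (by omega)]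
    simp
  rw [h1, List.nil_append]
  have htlen : 1 ≤ t.length := by
    cases t with
    | nil => exact absurd rfl ht
    | cons a b => simp
  have hrng : List.range' (1 + 1 * (r - 1)) t.length = List.range' r t.length := by
    congr 1; omega
  rw [hrng]
  have hexp : List.range' r t.length = r :: List.range' (r + 1) (t.length - 1) := by
    cases t with
    | nil => exact absurd rfl ht
    | cons a b => simp [List.range'_succ]
  rw [hexp, List.filter_cons]
  have hpr : ((List.replicate r s0 ++ t).getD r "" ≠ (List.replicate r s0 ++ t).getD (r - 1) "") = True := by
    have := getD_suf r s0 t 0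
    simp only [Nat.zero_add] at this
    rw [this, getD_pre r s0 t (r - 1) (by omega)]
    exact eq_true hh
  simp only [hpr, decide_true, if_pos trivial]
  congr 1
  have hs : List.range' (r + 1) (t.length - 1) = List.range' (1 + r) (t.length - 1) := by
    congr 1; omega
  rw [hs, filter_range'_shift _ _ (t.length - 1) r 1]
  intro j hj
  have e1 : (List.replicate r s0 ++ t).getD (j + r) "" = t.getD j "" := getD_suf r s0 t j
  have e2 : (List.replicate r s0 ++ t).getD (j + r - 1) "" = t.getD (j - 1) "" := by
    rw [show j + r - 1 = (j - 1) + r by omega]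
    exact getD_suf r s0 t (j - 1)
  rw [e1, e2]

lemma edges_shift (r : Nat) (s0 : String) (t : List String) (hr : 1 ≤ r)
    (ht : t ≠ []) (hh : t.getD 0 "" ≠ s0) :
    bEdges (List.replicate r s0 ++ t) = 0 :: (bEdges t).map (· + r) := by
  unfold bEdges
  rw [boundaries_shift r s0 t hr ht hh]
  simp [Nat.add_comm]

lemma alt_base (r : Nat) (s0 : String) (hr : 1 ≤ r) :
    group_series_alt (List.replicate r s0) =
      if s0 = "=" then [] else [(s0, (r : Int))] := by
  have hb : bBoundaries (List.replicate r s0) = [] := by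
    unfold bBoundaries
    rw [List.filter_eq_nil_iff]
    intro i hi
    rw [List.mem_range'] at hi
    obtain ⟨j, hj, hij⟩ := hi
    have hlen : (List.replicate r s0).length = r := by simp
    rw [hlen] at hj
    have e0 : List.replicate r s0 = List.replicate r s0 ++ ([] : List String) := by simp
    rw [e0, getD_pre r s0 [] i (by omega), getD_pre r s0 [] (i - 1) (by omega)]
    simp
  unfold group_series_alt bEdges
  rw [hb]
  have hget0 : (List.replicate r s0).getD 0 "" = s0 := by
    have e0 : List.replicate r s0 = List.replicate r s0 ++ ([] : List String) := by simp
    rw [e0]; exact getD_pre r s0 [] 0 (by omega)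
  simp only [List.nil_append, List.tail_cons, List.zip_cons_cons, List.zip_nil_right,
    List.filterMap_cons, List.filterMap_nil, hget0, List.length_replicate]
  by_cases h : s0 = "=" <;> simp [h]

lemma alt_shift (r : Nat) (s0 : String) (t : List String) (hr : 1 ≤ r)
    (ht : t ≠ []) (hh : t.getD 0 "" ≠ s0) :
    group_series_alt (List.replicate r s0 ++ t) =
      (if s0 = "=" then [] else [(s0, (r : Int))]) ++ group_series_alt t := by
  have hget0 : (List.replicate r s0 ++ t).getD 0 "" = s0 := getD_pre r s0 t 0 (by omega)
  obtain ⟨rest, hx⟩ : ∃ rest, bEdges t = 0 :: rest := ⟨_, rfl⟩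
  unfold group_series_alt
  rw [edges_shift r s0 t hr ht hh, hx]
  simp only [List.map_cons, List.tail_cons, Nat.zero_add]
  rw [List.zip_cons_cons, List.filterMap_cons]
  have hmapeq : (r : Nat) :: rest.map (· + r) = (0 :: rest).map (· + r) := by simp
  have hzip : ((r : Nat) :: rest.map (· + r)).zip (rest.map (· + r)) =
      ((0 :: rest).zip rest).map (Prod.map (· + r) (· + r)) := by
    rw [hmapeq, List.zip_map]
  rw [hzip, List.filterMap_map]
  have hfun : ((fun ab => if (List.replicate r s0 ++ t).getD ab.1 "" ≠ "=" then
        some ((List.replicate r s0 ++ t).getD ab.1 "", ((ab.2 : Nat) : Int) - ((ab.1 : Nat) : Int)) else none) ∘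
        Prod.map (· + r) (· + r) : Nat × Nat → Option (String × Int)) =
      (fun ab => if t.getD ab.1 "" ≠ "=" then
        some (t.getD ab.1 "", ((ab.2 : Nat) : Int) - ((ab.1 : Nat) : Int)) else none) := by
    funext ab
    obtain ⟨a, b⟩ := ab
    simp only [Function.comp_apply, Prod.map_apply]
    rw [getD_suf r s0 t a]
    have hcast : ((b + r : Nat) : Int) - ((a + r : Nat) : Int) = (b : Int) - (a : Int) := by
      push_cast; ring
    rw [hcast]
  rw [hfun, ← hx]
  rw [hget0]
  by_cases h : s0 = "=" <;> simp [h]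

lemma alt_eq_listAlt (signs : List String) (h : signs ≠ []) :
    group_series_alt signs = listAlt signs := by
  match signs with
  | s0 :: rest =>
    have hdec : s0 :: rest = List.replicate (1 + countRun s0 rest) s0 ++ rest.drop (countRun s0 rest) := by
      rw [Nat.add_comm, List.replicate_succ, List.cons_append, ← replicate_decomp]
    have hla : listAlt (s0 :: rest) =
        if s0 = "=" then listAlt (rest.drop (countRun s0 rest))
        else (s0, (1 + (countRun s0 rest : Int))) :: listAlt (rest.drop (countRun s0 rest)) := by
      rw [listAlt]
    by_cases ht : rest.drop (countRun s0 rest) = []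
    · rw [hla, ht]
      have : s0 :: rest = List.replicate (1 + countRun s0 rest) s0 := by
        rw [hdec, ht]; simp
      rw [this, alt_base _ _ (by omega)]
      by_cases h0 : s0 = "=" <;> simp [h0, listAlt]
    · have hh := drop_head_ne s0 rest ht
      have hrec : group_series_alt (rest.drop (countRun s0 rest)) = listAlt (rest.drop (countRun s0 rest)) :=
        alt_eq_listAlt (rest.drop (countRun s0 rest)) ht
      rw [hla, hdec, alt_shift _ _ _ (by omega) ht hh, hrec]
      by_cases h0 : s0 = "=" <;> simp [h0]
termination_by signs.length
decreasing_by
  have : (rest.drop (countRun s0 rest)).length ≤ rest.length := by simp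
  simp only [List.length_cons]; omega

-- ===== VERDICT =====
theorem group_series_spec : Claim_equal_group_series := by
  intro signs _ hpre
  unfold Spec_group_series
  rw [alt_eq_listAlt signs hpre]
  match signs with
  | [] => exact absurd rfl hpre
  | s0 :: rest =>
    show finishA (groupLoop rest [] s0 1) = _
    rw [groupLoop_eq_listAlt, listAlt]
    by_cases h : s0 = "=" <;> simp [h]
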